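-- pv_equiv track=rewrite | github.com/suhteevah/job-hunter-mcp | scripts/swarm/greenhouse_code_retry.py | pick_select_value
-- ===== SOURCE A (Python) =====
-- def pick_select_value(label: str, options: list) -> str:
--     ll = label.lower()
--     if "authorized" in ll or "authorization" in ll or "lawfully" in ll or "eligible" in ll:
--         for opt in options:
--             if "yes" in opt.lower() or "authorized" in opt.lower() or "do not require" in opt.lower():
--                 return opt
--     if "sponsor" in ll or "visa" in ll:
--         for opt in options:
--             ol = opt.lower()
--             if ol == "no" or "will not" in ol or "do not" in ol or "not require" in ol:
--                 return opt
--     if any(kw in ll for kw in ["agree", "privacy", "consent", "acknowledge"]):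
--         for opt in options:
--             if any(x in opt.lower() for x in ["agree", "yes", "i agree"]):
--                 return opt
--     if any(kw in ll for kw in ["gender", "race", "veteran", "disability", "ethnicity"]):
--         for opt in options:
--             if "decline" in opt.lower() or "prefer not" in opt.lower():
--                 return opt
--         return options[-1] if options else ""
--     if any(kw in ll for kw in ["how did you hear", "where did you"]):
--         for opt in options:
--             if any(x in opt.lower() for x in ["job board", "website", "online", "other"]):
--                 return opt
--     return options[0] if options else ""
-- ===== SOURCE B (Python) =====
-- # Single pass over options: record the first option matching each category's
-- # option test, then select purely from the label flags (A rescans the list per category).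
--
-- def _option_tests(ol):
--     return (
--         "yes" in ol or "authorized" in ol or "do not require" in ol,
--         ol == "no" or "will not" in ol or "do not" in ol or "not require" in ol,
--         "agree" in ol or "yes" in ol or "i agree" in ol,
--         "decline" in ol or "prefer not" in ol,
--         "job board" in ol or "website" in ol or "online" in ol or "other" in ol,
--     )
--
--
-- def pick_select_value(label: str, options: list) -> str:
--     first = [None, None, None, None, None]
--     for opt in options:
--         hits = _option_tests(opt.lower())
--         for i in range(5):
--             if first[i] is None and hits[i]:
--                 first[i] = opt
--     ll = label.lower()
--     if ("authorized" in ll or "authorization" in ll or "lawfully" in ll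
--             or "eligible" in ll) and first[0] is not None:
--         return first[0]
--     if ("sponsor" in ll or "visa" in ll) and first[1] is not None:
--         return first[1]
--     if ("agree" in ll or "privacy" in ll or "consent" in ll
--             or "acknowledge" in ll) and first[2] is not None:
--         return first[2]
--     if ("gender" in ll or "race" in ll or "veteran" in ll or "disability" in ll
--             or "ethnicity" in ll):
--         if first[3] is not None:
--             return first[3]
--         return options[-1] if options else ""
--     if ("how did you hear" in ll or "where did you" in ll) and first[4] is not None:
--         return first[4]
--     return options[0] if options else ""
-- ===== Notes on version B (the rewrite author's own statement) =====
-- stated objective: alternative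
-- what changed: B replaces A's label-major chain of five branches that each rescan the options list by a single option-major pass that accumulates, per category, the first option passing that category's test, followed by a pure selection on the label flags.
import Mathlib
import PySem

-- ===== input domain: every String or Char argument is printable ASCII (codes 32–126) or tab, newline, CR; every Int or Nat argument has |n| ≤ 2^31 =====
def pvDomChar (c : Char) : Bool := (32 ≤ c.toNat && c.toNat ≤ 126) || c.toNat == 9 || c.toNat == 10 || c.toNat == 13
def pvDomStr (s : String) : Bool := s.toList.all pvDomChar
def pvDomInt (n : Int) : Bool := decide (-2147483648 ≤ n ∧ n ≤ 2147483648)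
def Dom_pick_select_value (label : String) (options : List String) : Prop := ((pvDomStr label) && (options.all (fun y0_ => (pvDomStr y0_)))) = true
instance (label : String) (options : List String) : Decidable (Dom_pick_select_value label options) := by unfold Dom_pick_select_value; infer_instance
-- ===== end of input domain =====

-- B makes ONE pass over the options, recording the first option matching each category's
-- option test, then selects purely from the label flags; A rescans the options per category.

-- ===== PORT A =====
-- each `for opt in options: if …: return opt` loop of A, as its own structural recursion
def aLoop1 : List String → Option String
  | [] => none
  | opt :: rest =>
    if PySem.Str.isIn "yes" (PySem.Str.lower opt) || PySem.Str.isIn "authorized" (PySem.Str.lower opt) || PySem.Str.isIn "do not require" (PySem.Str.lower opt) then some opt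
    else aLoop1 rest

def aLoop2 : List String → Option String
  | [] => none
  | opt :: rest =>
    let ol := PySem.Str.lower opt
    if ol == "no" || PySem.Str.isIn "will not" ol || PySem.Str.isIn "do not" ol || PySem.Str.isIn "not require" ol then some opt
    else aLoop2 rest

def aLoop3 : List String → Option String
  | [] => none
  | opt :: rest =>
    if (["agree", "yes", "i agree"] : List String).any (fun x => PySem.Str.isIn x (PySem.Str.lower opt)) then some opt
    else aLoop3 rest

def aLoop4 : List String → Option String
  | [] => none
  | opt :: rest =>
    if PySem.Str.isIn "decline" (PySem.Str.lower opt) || PySem.Str.isIn "prefer not" (PySem.Str.lower opt) then some opt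
    else aLoop4 rest

def aLoop5 : List String → Option String
  | [] => none
  | opt :: rest =>
    if (["job board", "website", "online", "other"] : List String).any (fun x => PySem.Str.isIn x (PySem.Str.lower opt)) then some opt
    else aLoop5 rest

def pick_select_value (label : String) (options : List String) : String :=
  let ll := PySem.Str.lower label
  match (if PySem.Str.isIn "authorized" ll || PySem.Str.isIn "authorization" ll || PySem.Str.isIn "lawfully" ll || PySem.Str.isIn "eligible" ll then aLoop1 options else none) with
  | some o => o
  | none =>
  match (if PySem.Str.isIn "sponsor" ll || PySem.Str.isIn "visa" ll then aLoop2 options else none) with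
  | some o => o
  | none =>
  match (if (["agree", "privacy", "consent", "acknowledge"] : List String).any (fun kw => PySem.Str.isIn kw ll) then aLoop3 options else none) with
  | some o => o
  | none =>
    if (["gender", "race", "veteran", "disability", "ethnicity"] : List String).any (fun kw => PySem.Str.isIn kw ll) then
      match aLoop4 options with
      | some o => o
      | none => (options.getLast?).getD ""
    else
      match (if (["how did you hear", "where did you"] : List String).any (fun kw => PySem.Str.isIn kw ll) then aLoop5 options else none) with
      | some o => o
      | none => options.headD ""

-- ===== PORT B =====
-- the five per-option category tests (_option_tests in Source B)
def bT1 (ol : String) : Bool := PySem.Str.isIn "yes" ol || PySem.Str.isIn "authorized" ol || PySem.Str.isIn "do not require" ol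
def bT2 (ol : String) : Bool := ol == "no" || PySem.Str.isIn "will not" ol || PySem.Str.isIn "do not" ol || PySem.Str.isIn "not require" ol
def bT3 (ol : String) : Bool := PySem.Str.isIn "agree" ol || PySem.Str.isIn "yes" ol || PySem.Str.isIn "i agree" ol
def bT4 (ol : String) : Bool := PySem.Str.isIn "decline" ol || PySem.Str.isIn "prefer not" ol
def bT5 (ol : String) : Bool := PySem.Str.isIn "job board" ol || PySem.Str.isIn "website" ol || PySem.Str.isIn "online" ol || PySem.Str.isIn "other" ol

-- `if first[i] is None and hits[i]: first[i] = opt`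
def bUpd (o : Option String) (hit : Bool) (opt : String) : Option String :=
  if o.isNone && hit then some opt else o

abbrev BSt := Option String × Option String × Option String × Option String × Option String

-- one step of B's single pass over the options
def bStep (s : BSt) (opt : String) : BSt :=
  let ol := PySem.Str.lower opt
  (bUpd s.1 (bT1 ol) opt, bUpd s.2.1 (bT2 ol) opt, bUpd s.2.2.1 (bT3 ol) opt,
   bUpd s.2.2.2.1 (bT4 ol) opt, bUpd s.2.2.2.2 (bT5 ol) opt)

def pick_select_value_alt (label : String) (options : List String) : String :=
  let f := options.foldl bStep (none, none, none, none, none)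
  let ll := PySem.Str.lower label
  if (PySem.Str.isIn "authorized" ll || PySem.Str.isIn "authorization" ll || PySem.Str.isIn "lawfully" ll || PySem.Str.isIn "eligible" ll) && f.1.isSome then f.1.getD ""
  else if (PySem.Str.isIn "sponsor" ll || PySem.Str.isIn "visa" ll) && f.2.1.isSome then f.2.1.getD ""
  else if (PySem.Str.isIn "agree" ll || PySem.Str.isIn "privacy" ll || PySem.Str.isIn "consent" ll || PySem.Str.isIn "acknowledge" ll) && f.2.2.1.isSome then f.2.2.1.getD ""
  else if PySem.Str.isIn "gender" ll || PySem.Str.isIn "race" ll || PySem.Str.isIn "veteran" ll || PySem.Str.isIn "disability" ll || PySem.Str.isIn "ethnicity" ll then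
    match f.2.2.2.1 with
    | some o => o
    | none => (options.getLast?).getD ""
  else if (PySem.Str.isIn "how did you hear" ll || PySem.Str.isIn "where did you" ll) && f.2.2.2.2.isSome then f.2.2.2.2.getD ""
  else options.headD ""

-- ===== PRECONDITION & SPEC =====
def Spec_pick_select_value (label : String) (options : List String) (out : String) : Prop := out = pick_select_value_alt label options
instance (label : String) (options : List String) (out : String) : Decidable (Spec_pick_select_value label options out) := by unfold Spec_pick_select_value; infer_instance

-- ===== CLAIM (what is proved, stated in full; the proofs are below) =====
def Claim_equal_pick_select_value : Prop := ∀ (label : String) (options : List String), Dom_pick_select_value label options → Spec_pick_select_value label options (pick_select_value label options)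

-- ===== LEMMAS AND PROOFS =====
-- a filled slot sticks through the rest of the fold
theorem foldl_bUpd_some (g : String → Bool) (l : List String) (a : String) :
    l.foldl (fun o opt => bUpd o (g opt) opt) (some a) = some a := by
  induction l with
  | nil => rfl
  | cons x xs ih => simpa [bUpd] using ih

-- find? on a cons, with an if instead of bif
theorem find?_cons_ite {α : Type} (p : α → Bool) (x : α) (xs : List α) :
    List.find? p (x :: xs) = if p x = true then some x else List.find? p xs := by
  cases hp : p x <;> simp [List.find?, hp]

-- starting empty, the single-pass slot computes the first option whose test fires
theorem foldl_bUpd_none (g : String → Bool) (l : List String) :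
    l.foldl (fun o opt => bUpd o (g opt) opt) none = l.find? g := by
  induction l with
  | nil => rfl
  | cons x xs ih =>
    simp only [List.foldl_cons]
    cases hg : g x
    · rw [show bUpd none false x = none from rfl, ih,
        find?_cons_ite, if_neg (by simp [hg])]
    · rw [show bUpd none true x = some x from rfl,
        foldl_bUpd_some, find?_cons_ite, if_pos hg]

-- the tuple fold projects to five independent slot folds
theorem foldl_bStep_proj (l : List String) (s : BSt) :
    l.foldl bStep s =
      (l.foldl (fun o opt => bUpd o (bT1 (PySem.Str.lower opt)) opt) s.1,
       l.foldl (fun o opt => bUpd o (bT2 (PySem.Str.lower opt)) opt) s.2.1,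
       l.foldl (fun o opt => bUpd o (bT3 (PySem.Str.lower opt)) opt) s.2.2.1,
       l.foldl (fun o opt => bUpd o (bT4 (PySem.Str.lower opt)) opt) s.2.2.2.1,
       l.foldl (fun o opt => bUpd o (bT5 (PySem.Str.lower opt)) opt) s.2.2.2.2) := by
  induction l generalizing s with
  | nil => rfl
  | cons x xs ih => simp [List.foldl, ih, bStep]

-- each of A's rescans is the corresponding find?
theorem aLoop1_find (l : List String) : aLoop1 l = l.find? (fun opt => bT1 (PySem.Str.lower opt)) := by
  induction l with
  | nil => rfl
  | cons x xs ih => simp [aLoop1, find?_cons_ite, bT1, ih]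

theorem aLoop2_find (l : List String) : aLoop2 l = l.find? (fun opt => bT2 (PySem.Str.lower opt)) := by
  induction l with
  | nil => rfl
  | cons x xs ih => simp [aLoop2, find?_cons_ite, bT2, ih]

theorem aLoop3_find (l : List String) : aLoop3 l = l.find? (fun opt => bT3 (PySem.Str.lower opt)) := by
  induction l with
  | nil => rfl
  | cons x xs ih => simp [aLoop3, find?_cons_ite, bT3, ih, or_assoc]

theorem aLoop4_find (l : List String) : aLoop4 l = l.find? (fun opt => bT4 (PySem.Str.lower opt)) := by
  induction l with
  | nil => rfl
  | cons x xs ih => simp [aLoop4, find?_cons_ite, bT4, ih]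

theorem aLoop5_find (l : List String) : aLoop5 l = l.find? (fun opt => bT5 (PySem.Str.lower opt)) := by
  induction l with
  | nil => rfl
  | cons x xs ih => simp [aLoop5, find?_cons_ite, bT5, ih, or_assoc]

-- B's "c && slot filled → slot value" chain link equals A's "match (if c then loop else none)"
theorem chain_link (c : Bool) (o : Option String) (R : String) :
    (if c && o.isSome then o.getD "" else R) =
      (match (if c then o else none) with | some x => x | none => R) := by
  cases c <;> cases o <;> rfl

-- ===== VERDICT (by name: the statement is the Claim_ definition above) =====
theorem pick_select_value_spec : Claim_equal_pick_select_value := by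
  intro label options _
  unfold Spec_pick_select_value pick_select_value pick_select_value_alt
  simp only [foldl_bStep_proj, foldl_bUpd_none, chain_link,
    ← aLoop1_find, ← aLoop2_find, ← aLoop3_find, ← aLoop4_find, ← aLoop5_find,
    List.any_cons, List.any_nil, Bool.or_false, Bool.or_assoc]
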